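-- pv_equiv track=rewrite | github.com/SmartSparkCoding/hackanomoly-bot | nephthys/views/home/stats.py | _calculate_goal_progress
-- ===== SOURCE A (Python) =====
-- def _calculate_goal_progress(current_count: int) -> tuple[int, int | None, int | None]:
--     """Calculate previous goal, next goal, and remaining RSVPs."""
--     RSVP_GOALS = [80, 90, 100, 115, 130, 150, 300]
--     previous_goal = 0
--     for goal in RSVP_GOALS:
--         if current_count < goal:
--             return previous_goal, goal, goal - current_count
--         previous_goal = goal
--     return previous_goal, None, None
-- ===== SOURCE B (Python) =====
-- import bisect
--
-- def _calculate_goal_progress(current_count: int) -> tuple[int, int | None, int | None]: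
--     """Calculate previous goal, next goal, and remaining RSVPs."""
--     RSVP_GOALS = [80, 90, 100, 115, 130, 150, 300]
--     idx = bisect.bisect_right(RSVP_GOALS, current_count)
--     previous_goal = RSVP_GOALS[idx - 1] if idx > 0 else 0
--     if idx < len(RSVP_GOALS):
--         return previous_goal, RSVP_GOALS[idx], RSVP_GOALS[idx] - current_count
--     return previous_goal, None, None
-- ===== Notes on version B (the rewrite author's own statement) =====
-- stated objective: idiomatic
-- what changed: Replaces the sequential scan with carried previous_goal by a bisect_right binary search that yields the insertion index, then indexes directly for previous and next goal.
import Mathlib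
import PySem

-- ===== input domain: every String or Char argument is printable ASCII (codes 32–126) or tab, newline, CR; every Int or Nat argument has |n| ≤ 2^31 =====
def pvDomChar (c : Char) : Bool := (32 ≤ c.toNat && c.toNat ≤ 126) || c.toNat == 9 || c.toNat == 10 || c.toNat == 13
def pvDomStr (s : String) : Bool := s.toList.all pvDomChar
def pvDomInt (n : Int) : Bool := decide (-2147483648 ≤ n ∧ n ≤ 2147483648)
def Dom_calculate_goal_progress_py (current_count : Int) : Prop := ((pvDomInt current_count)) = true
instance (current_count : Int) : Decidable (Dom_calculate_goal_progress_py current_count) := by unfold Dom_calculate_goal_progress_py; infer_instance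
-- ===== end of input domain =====

-- ===== PORT A =====
-- B replaces A's sequential scan by a bisect_right binary search with direct indexing (idiomatic).
-- Literal port of A: fold over the goal list carrying previous_goal, returning at the first goal > count.
def pvGoalsScan (current_count : Int) (previous_goal : Int) : List Int → Int × Option Int × Option Int
  | [] => (previous_goal, none, none)
  | goal :: rest =>
      if current_count < goal then (previous_goal, some goal, some (goal - current_count))
      else pvGoalsScan current_count goal rest

def calculate_goal_progress_py (current_count : Int) : Int × Option Int × Option Int :=
  pvGoalsScan current_count 0 [80, 90, 100, 115, 130, 150, 300]

-- ===== PORT B =====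
-- Literal port of Python's bisect.bisect_right loop (fuel = hi - lo suffices; list length + 1 is plenty).
def pvBisectGo (a : List Int) (x : Int) : Nat → Nat → Nat → Nat
  | 0, lo, _ => lo
  | n + 1, lo, hi =>
      if lo < hi then
        let mid := (lo + hi) / 2
        if x < a.getD mid 0 then pvBisectGo a x n lo mid
        else pvBisectGo a x n (mid + 1) hi
      else lo

def pvBisectRight (a : List Int) (x : Int) : Nat :=
  pvBisectGo a x (a.length + 1) 0 a.length

def calculate_goal_progress_py_alt (current_count : Int) : Int × Option Int × Option Int :=
  let goals : List Int := [80, 90, 100, 115, 130, 150, 300]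
  let idx := pvBisectRight goals current_count
  let previous_goal := if idx > 0 then goals.getD (idx - 1) 0 else 0
  if idx < goals.length then
    (previous_goal, some (goals.getD idx 0), some (goals.getD idx 0 - current_count))
  else (previous_goal, none, none)

-- ===== PRECONDITION & SPEC =====
def Spec_calculate_goal_progress_py (current_count : Int) (out : Int × Option Int × Option Int) : Prop := out = calculate_goal_progress_py_alt current_count
instance (current_count : Int) (out : Int × Option Int × Option Int) : Decidable (Spec_calculate_goal_progress_py current_count out) := by unfold Spec_calculate_goal_progress_py; infer_instance

-- ===== CLAIM (what is proved, stated in full; the proofs are below) =====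
def Claim_equal_calculate_goal_progress_py : Prop := ∀ (current_count : Int), Dom_calculate_goal_progress_py current_count → Spec_calculate_goal_progress_py current_count (calculate_goal_progress_py current_count)

-- ===== LEMMAS AND PROOFS =====

theorem calculate_goal_progress_py_spec : Claim_equal_calculate_goal_progress_py := by
  intro cc _
  unfold Spec_calculate_goal_progress_py
  unfold calculate_goal_progress_py calculate_goal_progress_py_alt pvBisectRight
  by_cases h1 : cc < 80
  · simp [pvGoalsScan, pvBisectGo, (show cc < 80 from by omega), (show cc < 90 from by omega), (show cc < 115 from by omega)]
  · by_cases h2 : cc < 90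
    · simp [pvGoalsScan, pvBisectGo, (show ¬ cc < 80 from by omega), (show cc < 90 from by omega), (show cc < 115 from by omega)]
    · by_cases h3 : cc < 100
      · simp [pvGoalsScan, pvBisectGo, (show ¬ cc < 80 from by omega), (show ¬ cc < 90 from by omega), (show cc < 100 from by omega), (show cc < 115 from by omega)]
      · by_cases h4 : cc < 115
        · simp [pvGoalsScan, pvBisectGo, (show ¬ cc < 80 from by omega), (show ¬ cc < 90 from by omega), (show ¬ cc < 100 from by omega), (show cc < 115 from by omega)]
        · by_cases h5 : cc < 130
          · simp [pvGoalsScan, pvBisectGo, (show ¬ cc < 80 from by omega), (show ¬ cc < 90 from by omega), (show ¬ cc < 100 from by omega), (show ¬ cc < 115 from by omega), (show cc < 130 from by omega), (show cc < 150 from by omega)]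
          · by_cases h6 : cc < 150
            · simp [pvGoalsScan, pvBisectGo, (show ¬ cc < 80 from by omega), (show ¬ cc < 90 from by omega), (show ¬ cc < 100 from by omega), (show ¬ cc < 115 from by omega), (show ¬ cc < 130 from by omega), (show cc < 150 from by omega)]
            · by_cases h7 : cc < 300
              · simp [pvGoalsScan, pvBisectGo, (show ¬ cc < 80 from by omega), (show ¬ cc < 90 from by omega), (show ¬ cc < 100 from by omega), (show ¬ cc < 115 from by omega), (show ¬ cc < 130 from by omega), (show ¬ cc < 150 from by omega), (show cc < 300 from by omega)]
              · simp [pvGoalsScan, pvBisectGo, (show ¬ cc < 80 from by omega), (show ¬ cc < 90 from by omega), (show ¬ cc < 100 from by omega), (show ¬ cc < 115 from by omega), (show ¬ cc < 130 from by omega), (show ¬ cc < 150 from by omega), (show ¬ cc < 300 from by omega)]
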